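-- pv_equiv track=rewrite | github.com/efriman/snp2fasta | snp2fasta/snp2fasta_functions.py | check_if_entry_part_of_list
-- ===== SOURCE A (Python) =====
-- import itertools
--
-- def check_if_entry_part_of_list(checkfor, list_of_lists):
--     assert isinstance(checkfor, list)
--     assert isinstance(list_of_lists, list)
--     for list_entry in list_of_lists:
--         for comb in itertools.combinations(list_entry, len(checkfor)):
--             if tuple(checkfor) == comb:
--                 return True
--     return False
-- ===== SOURCE B (Python) =====
-- def check_if_entry_part_of_list(checkfor, list_of_lists):
--     assert isinstance(checkfor, list)
--     assert isinstance(list_of_lists, list)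
--     for list_entry in list_of_lists:
--         i = 0
--         for x in list_entry:
--             if i < len(checkfor) and checkfor[i] == x:
--                 i += 1
--         if i == len(checkfor):
--             return True
--     return False
-- ===== Notes on version B (the rewrite author's own statement) =====
-- stated objective: faster
-- what changed: Replaces enumerating all length-k combinations of each entry with a single-pass two-pointer subsequence scan per entry.
import Mathlib
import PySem

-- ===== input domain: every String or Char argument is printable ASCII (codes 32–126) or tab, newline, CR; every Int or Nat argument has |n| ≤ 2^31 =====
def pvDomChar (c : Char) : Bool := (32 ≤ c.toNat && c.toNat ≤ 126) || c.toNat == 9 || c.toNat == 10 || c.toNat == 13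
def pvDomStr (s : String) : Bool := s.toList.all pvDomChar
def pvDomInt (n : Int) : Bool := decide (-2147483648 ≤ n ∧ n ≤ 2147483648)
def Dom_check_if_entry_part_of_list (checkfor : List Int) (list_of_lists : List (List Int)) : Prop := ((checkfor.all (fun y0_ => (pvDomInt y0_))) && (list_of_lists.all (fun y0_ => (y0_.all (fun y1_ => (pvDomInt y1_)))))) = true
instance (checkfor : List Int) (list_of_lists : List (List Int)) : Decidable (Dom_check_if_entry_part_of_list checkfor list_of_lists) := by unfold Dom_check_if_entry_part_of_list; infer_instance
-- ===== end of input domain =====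

-- B replaces A's enumeration of all length-k combinations of each entry by a
-- single-pass two-pointer subsequence scan per entry (asymptotically faster).

-- ===== PORT A =====
-- itertools.combinations(xs, k), in itertools' emission order
def pvCombos (xs : List Int) (k : Nat) : List (List Int) :=
  match xs, k with
  | _, 0 => [[]]
  | [], _ + 1 => []
  | x :: rest, k + 1 => (pvCombos rest k).map (fun c => x :: c) ++ pvCombos rest (k + 1)

def check_if_entry_part_of_list (checkfor : List Int) (list_of_lists : List (List Int)) : Bool :=
  -- for list_entry in list_of_lists: for comb in combinations(...): if tuple(checkfor) == comb: return True
  list_of_lists.any (fun list_entry =>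
    (pvCombos list_entry checkfor.length).any (fun comb => checkfor == comb))

-- ===== PORT B =====
-- per-entry two-pointer scan: i advances while checkfor[i] matches the current element
def pvScan (checkfor : List Int) (list_entry : List Int) : Nat :=
  list_entry.foldl (fun i x => if i < checkfor.length && checkfor[i]? == some x then i + 1 else i) 0

def check_if_entry_part_of_list_alt (checkfor : List Int) (list_of_lists : List (List Int)) : Bool :=
  list_of_lists.any (fun list_entry => pvScan checkfor list_entry == checkfor.length)

-- ===== PRECONDITION & SPEC =====
def Spec_check_if_entry_part_of_list (checkfor : List Int) (list_of_lists : List (List Int)) (out : Bool) : Prop := out = check_if_entry_part_of_list_alt checkfor list_of_lists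
instance (checkfor : List Int) (list_of_lists : List (List Int)) (out : Bool) : Decidable (Spec_check_if_entry_part_of_list checkfor list_of_lists out) := by unfold Spec_check_if_entry_part_of_list; infer_instance

-- ===== CLAIM (what is proved, stated in full; the proofs are below) =====
def Claim_equal_check_if_entry_part_of_list : Prop := ∀ (checkfor : List Int) (list_of_lists : List (List Int)), Dom_check_if_entry_part_of_list checkfor list_of_lists → Spec_check_if_entry_part_of_list checkfor list_of_lists (check_if_entry_part_of_list checkfor list_of_lists)

-- ===== LEMMAS AND PROOFS =====

-- membership in pvCombos = sublists of the given length
theorem mem_pvCombos (xs : List Int) (k : Nat) (l : List Int) :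
    l ∈ pvCombos xs k ↔ l.length = k ∧ l.Sublist xs := by
  induction xs generalizing k l with
  | nil =>
    cases k with
    | zero => simp [pvCombos, List.sublist_nil]
    | succ k =>
      simp only [pvCombos, List.not_mem_nil, false_iff]
      rintro ⟨hl, hs⟩
      have := hs.length_le
      simp [hl] at this
  | cons x rest ih =>
    cases k with
    | zero =>
      simp only [pvCombos, List.mem_singleton]
      constructor
      · rintro rfl; exact ⟨rfl, List.nil_sublist _⟩
      · rintro ⟨hl, _⟩; exact List.length_eq_zero_iff.mp hl
    | succ k =>
      simp only [pvCombos, List.mem_append, List.mem_map]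
      constructor
      · rintro (⟨c, hc, rfl⟩ | h)
        · obtain ⟨hlen, hsub⟩ := (ih k c).mp hc
          exact ⟨by simp [hlen], List.cons_sublist_cons.mpr hsub⟩
        · obtain ⟨hlen, hsub⟩ := (ih (k + 1) l).mp h
          exact ⟨hlen, hsub.trans (List.sublist_cons_self x rest)⟩
      · rintro ⟨hlen, hsub⟩
        rcases List.sublist_cons_iff.mp hsub with h | ⟨r, rfl, hr⟩
        · exact Or.inr ((ih (k + 1) l).mpr ⟨hlen, h⟩)
        · exact Or.inl ⟨r, (ih k r).mpr ⟨by simpa using hlen, hr⟩, rfl⟩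

-- the two-pointer invariant: starting at pointer i ≤ |checkfor|, the scan
-- consumes the whole pattern iff the remaining pattern is a sublist of the entry
theorem pvScan_invariant (checkfor : List Int) (e : List Int) (i : Nat) (hi : i ≤ checkfor.length) :
    (e.foldl (fun i x => if i < checkfor.length && checkfor[i]? == some x then i + 1 else i) i
        = checkfor.length)
      ↔ (checkfor.drop i).Sublist e := by
  induction e generalizing i with
  | nil =>
    simp only [List.foldl_nil, List.sublist_nil, List.drop_eq_nil_iff]
    omega
  | cons x e ih =>
    simp only [List.foldl_cons]
    by_cases h : i < checkfor.length && checkfor[i]? == some x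
    · simp only [h, if_pos]
      simp only [Bool.and_eq_true, decide_eq_true_eq, beq_iff_eq] at h
      obtain ⟨hlt, hget⟩ := h
      have hdrop : checkfor.drop i = x :: checkfor.drop (i + 1) := by
        rw [List.drop_eq_getElem_cons hlt]
        have : checkfor[i] = x := by
          have := List.getElem?_eq_getElem hlt
          rw [this] at hget; exact Option.some.inj hget
        rw [this]
      rw [ih (i + 1) (by omega), hdrop, List.cons_sublist_cons]
    · simp only [h, if_neg, Bool.not_eq_true]
      rw [ih i hi]
      simp only [Bool.and_eq_true, not_and, decide_eq_true_eq, beq_iff_eq] at h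
      by_cases hlt : i < checkfor.length
      · have hne : checkfor[i] ≠ x := by
          intro hx
          exact (h hlt) (by rw [List.getElem?_eq_getElem hlt, hx])
        have hdrop : checkfor.drop i = checkfor[i] :: checkfor.drop (i + 1) :=
          List.drop_eq_getElem_cons hlt
        rw [hdrop]
        constructor
        · intro hs; exact hs.trans (List.sublist_cons_self x e)
        · intro hs
          rcases List.sublist_cons_iff.mp hs with h' | ⟨r, hr, hre⟩
          · exact h'
          · exact absurd (List.head_eq_of_cons_eq hr) hne
      · have : i = checkfor.length := by omega
        simp [this]

theorem entry_check_eq (checkfor : List Int) (e : List Int) :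
    ((pvCombos e checkfor.length).any (fun comb => checkfor == comb))
      = (pvScan checkfor e == checkfor.length) := by
  rw [Bool.eq_iff_iff]
  simp only [List.any_eq_true, beq_iff_eq, pvScan]
  rw [pvScan_invariant checkfor e 0 (Nat.zero_le _)]
  simp only [List.drop_zero]
  constructor
  · rintro ⟨c, hc, rfl⟩
    exact ((mem_pvCombos e checkfor.length checkfor).mp hc).2
  · intro hs
    exact ⟨checkfor, (mem_pvCombos e checkfor.length checkfor).mpr ⟨rfl, hs⟩, rfl⟩

-- ===== VERDICT (by name: the statement is the Claim_ definition above) =====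
theorem check_if_entry_part_of_list_spec : Claim_equal_check_if_entry_part_of_list := by
  intro checkfor list_of_lists hdom
  clear hdom
  unfold Spec_check_if_entry_part_of_list check_if_entry_part_of_list check_if_entry_part_of_list_alt
  induction list_of_lists with
  | nil => rfl
  | cons e rest ih =>
    simp only [List.any_cons]
    rw [entry_check_eq checkfor e, ih]
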